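-- pv_equiv track=rewrite | github.com/Magannya/soccerSimulationUAMI | src/dataMan.py | subStrFirstFloat
-- ===== SOURCE A (Python) =====
-- def subStrFirstFloat(s):
--     out = ""
--     seccond = False
--     first = False
--
--     if s[0] == '-':
--         first = True
--
--     for c in s:
--
--         if first:
--             out += c
--             first = False
--             continue
--
--         else:
--
--             if c == '-':
--                 seccond = True
--
--             if not seccond:
--                 out += c
--
--         if seccond:
--             break
--
--     return out
-- ===== SOURCE B (Python) =====
-- def subStrFirstFloat(s):
--     start = 1 if s[0] == '-' else 0
--     idx = s.find('-', start)
--     return s if idx == -1 else s[:idx]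
-- ===== Notes on version B (the rewrite author's own statement) =====
-- stated objective: idiomatic
-- what changed: Replaces the flag-driven per-character accumulation loop with a direct computation of the cut index via str.find (offset past a leading '-') followed by a single slice.
import Mathlib
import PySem

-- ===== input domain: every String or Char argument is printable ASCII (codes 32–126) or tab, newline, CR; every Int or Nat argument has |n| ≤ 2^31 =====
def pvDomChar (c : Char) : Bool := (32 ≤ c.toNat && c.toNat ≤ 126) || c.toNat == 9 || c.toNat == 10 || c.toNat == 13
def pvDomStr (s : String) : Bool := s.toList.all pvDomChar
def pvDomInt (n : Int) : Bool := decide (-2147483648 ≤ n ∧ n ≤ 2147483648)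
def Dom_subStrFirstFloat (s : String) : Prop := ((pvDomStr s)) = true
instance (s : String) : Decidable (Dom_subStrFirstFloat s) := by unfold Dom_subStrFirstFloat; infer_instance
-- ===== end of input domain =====

-- B replaces A's flag-driven per-character accumulation loop with find-the-cut-index then slice (idiomatic, same cost).

-- ===== PORT A =====
-- A's for-loop with `break`, as structural recursion over the same state (out, first, seccond).
def subStrFirstFloatGo : List Char → List Char → Bool → Bool → List Char
  | [], out, _, _ => out
  | c :: rest, out, first, seccond =>
    if first then
      subStrFirstFloatGo rest (out ++ [c]) false seccond
    else
      let seccond' := if c = '-' then true else seccond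
      let out' := if !seccond' then out ++ [c] else out
      if seccond' then out' else subStrFirstFloatGo rest out' false seccond'

-- s[0] is PySem.List.pyGetD under Pre_ (s ≠ ""); on "" Python raises IndexError, excluded by Pre_.
def subStrFirstFloat (s : String) : String :=
  let first := PySem.List.pyGetD s.toList 0 ' ' = '-'
  String.ofList (subStrFirstFloatGo s.toList [] first false)

-- ===== PORT B =====
def subStrFirstFloat_alt (s : String) : String :=
  let start : Int := if PySem.List.pyGetD s.toList 0 ' ' = '-' then 1 else 0
  let idx := PySem.Str.findFrom s "-" start
  if idx = -1 then s else PySem.Str.slice s none (some idx)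

-- ===== PRECONDITION & SPEC =====
-- Pre_ excludes exactly the empty string, on which Python A raises IndexError at s[0] (B raises there too).
def Pre_subStrFirstFloat (s : String) : Prop := s ≠ ""
instance (s : String) : Decidable (Pre_subStrFirstFloat s) := by unfold Pre_subStrFirstFloat; infer_instance
def pvWitness_subStrFirstFloat : String := "-12.5-3"

def Spec_subStrFirstFloat (s : String) (out : String) : Prop := out = subStrFirstFloat_alt s
instance (s : String) (out : String) : Decidable (Spec_subStrFirstFloat s out) := by unfold Spec_subStrFirstFloat; infer_instance

-- ===== CLAIM (what is proved, stated in full; the proofs are below) =====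
def Claim_equal_subStrFirstFloat : Prop := ∀ (s : String), Dom_subStrFirstFloat s → Pre_subStrFirstFloat s → Spec_subStrFirstFloat s (subStrFirstFloat s)

-- ===== LEMMAS AND PROOFS =====

-- A's loop with the sign already consumed takes characters up to (not including) the next '-'.
theorem subStrFirstFloatGo_false (cs out : List Char) :
    subStrFirstFloatGo cs out false false = out ++ cs.takeWhile (· ≠ '-') := by
  induction cs generalizing out with
  | nil => simp [subStrFirstFloatGo]
  | cons c rest ih =>
    by_cases hc : c = '-'
    · simp [subStrFirstFloatGo, hc]
    · simp [subStrFirstFloatGo, hc, ih, List.takeWhile_cons]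

-- q := (takeWhile (· ≠ d) cs).length is the first index holding d (if any).
theorem takeWhile_ne_spec (d : Char) (cs : List Char) :
    (∀ i, i < (cs.takeWhile (· ≠ d)).length → cs[i]? ≠ some d) ∧
    ((cs.takeWhile (· ≠ d)).length < cs.length → cs[(cs.takeWhile (· ≠ d)).length]? = some d) := by
  induction cs with
  | nil => simp
  | cons c rest ih =>
    by_cases hc : c = d
    · subst hc
      simp [List.takeWhile_cons]
    · refine ⟨?_, ?_⟩
      · intro i hi
        rw [List.takeWhile_cons_of_pos (by simp [hc])] at hi
        cases i with
        | zero => simp [hc]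
        | succ j =>
          simp only [List.length_cons] at hi
          simpa using ih.1 j (by omega)
      · intro hlt
        rw [List.takeWhile_cons_of_pos (by simp [hc])] at hlt ⊢
        simp only [List.length_cons] at hlt ⊢
        simpa using ih.2 (by omega)

theorem prefix_single_iff (l : List Char) (d : Char) :
    [d] <+: l ↔ l.head? = some d := by
  cases l with
  | nil => simp
  | cons x xs =>
    constructor
    · rintro ⟨t, ht⟩; simp at ht; simp [ht.1]
    · intro h; simp at h; exact ⟨xs, by simp [h]⟩

theorem find_single_not_mem {cs : List Char} {d : Char} (h : d ∉ cs) :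
    PySem.Chars.find cs [d] = -1 := by
  rw [PySem.Chars.find_eq_neg_one_iff]
  intro hin
  exact h (hin.mem (by simp))

theorem find_single_mem {cs : List Char} {d : Char} (h : d ∈ cs) :
    PySem.Chars.find cs [d] = ((cs.takeWhile (· ≠ d)).length : Int) := by
  have hnn : 0 ≤ PySem.Chars.find cs [d] := by
    rw [PySem.Chars.find_nonneg_iff]
    obtain ⟨p, q, hp⟩ := List.mem_iff_append.mp h
    exact ⟨p, q, by simp [hp]⟩
  obtain ⟨hpre, hleast⟩ := PySem.Chars.find_spec hnn
  set n := (PySem.Chars.find cs [d]).toNat with hn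
  set q := (cs.takeWhile (· ≠ d)).length with hq
  have hget : cs[n]? = some d := by
    have := (prefix_single_iff _ _).mp hpre
    rwa [List.head?_drop] at this
  have hnlen : n < cs.length := (List.getElem?_eq_some_iff.mp hget).1
  obtain ⟨hq1, hq2⟩ := takeWhile_ne_spec d cs
  have hqlen : q < cs.length := by
    by_contra hge
    push_neg at hge
    have hself : cs.takeWhile (· ≠ d) = cs :=
      List.IsPrefix.eq_of_length_le (List.takeWhile_prefix _) (by omega)
    have := List.takeWhile_eq_self_iff.mp hself d h
    simp at this
  have hnq : n ≤ q := by
    by_contra hlt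
    push_neg at hlt
    refine hleast q hlt ((prefix_single_iff _ _).mpr ?_)
    rw [List.head?_drop]
    exact hq2 hqlen
  have hqn : q ≤ n := by
    by_contra hlt
    push_neg at hlt
    exact hq1 n hlt hget
  omega

-- two strings with the same character list are equal
theorem string_eq_of_toList {a b : String} (h : a.toList = b.toList) : a = b := by
  have := congrArg String.ofList h
  rwa [String.ofList_toList, String.ofList_toList] at this

theorem take_takeWhile_length (p : Char → Bool) (cs : List Char) :
    cs.take (cs.takeWhile p).length = cs.takeWhile p :=
  ((List.prefix_iff_eq_take).mp (List.takeWhile_prefix p)).symm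

-- ===== VERDICT (by name: the statement is the Claim_ definition above) =====
theorem subStrFirstFloat_spec : Claim_equal_subStrFirstFloat := by
  intro s _ hpre
  unfold Spec_subStrFirstFloat
  have hne : s.toList ≠ [] := by
    intro h
    exact hpre (by rw [← String.ofList_toList (s := s), h])
  obtain ⟨c, rest, ht⟩ := List.exists_cons_of_ne_nil hne
  by_cases hc : c = '-'
  · -- leading sign: A's loop consumes it, B starts the search at index 1
    subst hc
    have hA : subStrFirstFloat s = String.ofList ('-' :: rest.takeWhile (· ≠ '-')) := by
      simp [subStrFirstFloat, ht, subStrFirstFloatGo, subStrFirstFloatGo_false]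
    have h1 : PySem.Chars.findFrom s.toList "-".toList (1 : Int) =
        if PySem.Chars.find rest "-".toList = -1 then -1
        else (1 : Int) + PySem.Chars.find rest "-".toList := by
      have := PySem.Chars.findFrom_natCast s.toList "-".toList 1 (by rw [ht]; simp)
      rw [ht] at this ⊢
      simpa using this
    have hB0 : subStrFirstFloat_alt s =
        (if PySem.Chars.findFrom s.toList "-".toList 1 = -1 then s
         else PySem.Str.slice s none (some (PySem.Chars.findFrom s.toList "-".toList 1))) := by
      simp only [subStrFirstFloat_alt, PySem.Str.findFrom_eq]
      rw [ht]
      simp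
    rw [hA, hB0, h1]
    by_cases hm : '-' ∈ rest
    · rw [show ("-" : String).toList = ['-'] from rfl, find_single_mem hm]
      rw [if_neg (by omega), if_neg (by omega)]
      apply string_eq_of_toList
      rw [PySem.Str.toList_slice]
      have hcast : (1 : Int) + ((rest.takeWhile (· ≠ '-')).length : Int) =
          (((1 + (rest.takeWhile (· ≠ '-')).length : Nat) : Int)) := by push_cast; ring
      rw [hcast]
      simp only [PySem.Chars.slice_eq_listSlice, PySem.List.slice_to_natCast,
        String.toList_ofList]
      rw [ht, Nat.add_comm, List.take_succ_cons, take_takeWhile_length]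
    · rw [show ("-" : String).toList = ['-'] from rfl, find_single_not_mem hm]
      rw [if_pos rfl]
      have hself : rest.takeWhile (· ≠ '-') = rest :=
        List.takeWhile_eq_self_iff.mpr (fun x hx => by
          simp [show x ≠ '-' from fun h => hm (h ▸ hx)])
      rw [hself, ← ht, String.ofList_toList]
      simp
  · -- no leading sign: B searches from index 0
    have hA : subStrFirstFloat s = String.ofList (s.toList.takeWhile (· ≠ '-')) := by
      simp only [subStrFirstFloat, ht, PySem.List.pyGetD_zero_cons, decide_eq_false hc,
        subStrFirstFloatGo_false, List.nil_append]
    have hB0 : subStrFirstFloat_alt s =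
        (if PySem.Chars.find s.toList "-".toList = -1 then s
         else PySem.Str.slice s none (some (PySem.Chars.find s.toList "-".toList))) := by
      simp only [subStrFirstFloat_alt, PySem.Str.findFrom_eq]
      rw [ht]
      simp only [PySem.List.pyGetD_zero_cons, if_neg hc]
      rw [← ht, PySem.Chars.findFrom_zero]
    rw [hA, hB0]
    by_cases hm : '-' ∈ s.toList
    · rw [show ("-" : String).toList = ['-'] from rfl, find_single_mem hm]
      rw [if_neg (by omega)]
      apply string_eq_of_toList
      rw [PySem.Str.toList_slice]
      simp only [PySem.Chars.slice_eq_listSlice, PySem.List.slice_to_natCast]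
      simp [take_takeWhile_length]
    · rw [show ("-" : String).toList = ['-'] from rfl, find_single_not_mem hm]
      rw [if_pos rfl]
      have hself : s.toList.takeWhile (· ≠ '-') = s.toList :=
        List.takeWhile_eq_self_iff.mpr (fun x hx => by
          simp [show x ≠ '-' from fun h => hm (h ▸ hx)])
      rw [hself, String.ofList_toList]
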